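-- pv_equiv track=rewrite | github.com/hienpham15/Algos_and_Data_struct_UCSandiego | Algorithmic_Design_and_Techniques/Divide_and_Conquer/majority_element.py | is_majority
-- ===== SOURCE A (Python) =====
-- def is_majority(x, arr):
--     mid = len(arr)//2
--     if len(arr) <= 3:
--         count = 0
--         for i in range(len(arr)):
--             if arr[i] == x:
--                 count += 1
--         if count > 1:
--             return True
--         else:
--             return False
--
--     left = is_majority(x, arr[:mid])
--     right = is_majority(x, arr[mid:])
--     return  (left and right)
-- ===== SOURCE B (Python) =====
-- def is_majority(x, arr):
--     # Iterative: explicit stack of index ranges instead of recursion with list slicing.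
--     stack = [(0, len(arr))]
--     acc = True
--     while stack:
--         lo, hi = stack.pop()
--         n = hi - lo
--         if n <= 3:
--             count = 0
--             for i in range(lo, hi):
--                 if arr[i] == x:
--                     count += 1
--             acc = acc and (count > 1)
--         else:
--             mid = n // 2
--             stack.append((lo, lo + mid))
--             stack.append((lo + mid, hi))
--     return acc
-- ===== Notes on version B (the rewrite author's own statement) =====
-- stated objective: alternative
-- what changed: Replaced the recursive divide-and-conquer with slice copies by an iterative explicit stack of (lo,hi) index ranges with a boolean accumulator, counting leaf segments in place without copying.
import Mathlib
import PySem

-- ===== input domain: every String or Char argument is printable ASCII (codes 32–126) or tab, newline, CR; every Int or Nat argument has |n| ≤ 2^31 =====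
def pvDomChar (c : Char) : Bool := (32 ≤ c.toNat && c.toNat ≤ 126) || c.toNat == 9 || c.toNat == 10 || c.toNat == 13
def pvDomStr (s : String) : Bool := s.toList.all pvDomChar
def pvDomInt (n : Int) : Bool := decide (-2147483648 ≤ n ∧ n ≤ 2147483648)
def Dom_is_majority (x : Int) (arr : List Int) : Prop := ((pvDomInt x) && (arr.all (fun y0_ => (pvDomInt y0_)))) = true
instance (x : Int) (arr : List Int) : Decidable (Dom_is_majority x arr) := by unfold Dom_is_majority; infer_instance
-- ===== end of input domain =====

-- B replaces A's recursion-with-slice-copies by an explicit stack of index ranges (no copying); return values proved equal.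

-- ===== PORT A =====
def is_majority (x : Int) (arr : List Int) : Bool :=
  let mid : Int := PySem.Int.floordiv (arr.length : Int) 2
  if arr.length ≤ 3 then
    let count : Int := (PySem.List.pyRange 0 arr.length 1).foldl
        (fun c i => if PySem.List.pyGetD arr i 0 == x then c + 1 else c) 0
    -- indices from range(len(arr)) are always in bounds, so pyGetD's default is never used
    if count > 1 then true else false
  else
    let left := is_majority x (PySem.List.slice arr none (some mid))
    let right := is_majority x (PySem.List.slice arr (some mid) none)
    left && right
termination_by arr.length
decreasing_by
  · have h2 : PySem.Int.floordiv (arr.length : Int) 2 = ((arr.length / 2 : Nat) : Int) := by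
      exact_mod_cast PySem.Int.floordiv_natCast arr.length 2
    rw [h2, PySem.List.slice_to_natCast]; simp; omega
  · have h2 : PySem.Int.floordiv (arr.length : Int) 2 = ((arr.length / 2 : Nat) : Int) := by
      exact_mod_cast PySem.Int.floordiv_natCast arr.length 2
    rw [h2, PySem.List.slice_from_natCast]; simp; omega

-- ===== PORT B =====
-- count of elements of arr[lo:hi] equal to x, via the index loop 'for i in range(lo, hi)'
def segCount (x : Int) (arr : List Int) (lo hi : Nat) : Int :=
  (PySem.List.pyRange lo hi 1).foldl
    (fun c i => if PySem.List.pyGetD arr i 0 == x then c + 1 else c) 0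

def pvWt (p : Nat × Nat) : Nat := 2 * (p.2 - p.1) - 1
def pvMeasure (st : List (Nat × Nat)) : Nat := 2 * (st.map pvWt).sum + st.length

-- the while-stack loop; head of the list is the top of the stack
def stackRun (x : Int) (arr : List Int) : List (Nat × Nat) → Bool → Bool
  | [], acc => acc
  | (lo, hi) :: rest, acc =>
    let n := hi - lo
    if n ≤ 3 then
      stackRun x arr rest (acc && decide (segCount x arr lo hi > 1))
    else
      let mid := n / 2
      stackRun x arr ((lo + mid, hi) :: (lo, lo + mid) :: rest) acc
termination_by st _ => pvMeasure st
decreasing_by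
  · simp [pvMeasure]; omega
  · simp [pvMeasure, pvWt]; omega

def is_majority_alt (x : Int) (arr : List Int) : Bool :=
  stackRun x arr [(0, arr.length)] true

-- ===== PRECONDITION & SPEC =====
def Spec_is_majority (x : Int) (arr : List Int) (out : Bool) : Prop := out = is_majority_alt x arr
instance (x : Int) (arr : List Int) (out : Bool) : Decidable (Spec_is_majority x arr out) := by unfold Spec_is_majority; infer_instance

-- ===== CLAIM (what is proved, stated in full; the proofs are below) =====
def Claim_equal_is_majority : Prop := ∀ (x : Int) (arr : List Int), Dom_is_majority x arr → Spec_is_majority x arr (is_majority x arr)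

-- ===== LEMMAS AND PROOFS =====

-- A applied to the segment arr[lo:hi]
def segA (x : Int) (arr : List Int) (p : Nat × Nat) : Bool :=
  is_majority x ((arr.drop p.1).take (p.2 - p.1))

lemma cntP (x : Int) (arr : List Int) :
    ∀ (n lo : Nat), lo + n ≤ arr.length →
      (PySem.List.pyRange lo (lo + (n : Int)) 1).countP (fun i => PySem.List.pyGetD arr i 0 == x)
        = ((arr.drop lo).take n).count x := by
  intro n
  induction n with
  | zero =>
    intro lo h
    rw [PySem.List.pyRange_one_eq_nil (by simp)]
    simp
  | succ n ih =>
    intro lo h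
    rw [PySem.List.pyRange_one_cons (by push_cast; omega)]
    rw [List.countP_cons]
    have hlo : lo < arr.length := by omega
    have hget : PySem.List.pyGetD arr (lo : Int) 0 = arr[lo] := by
      rw [PySem.List.pyGetD_natCast, List.getD_eq_getElem _ _ hlo]
    have e1 : ((lo : Int) + 1) = ((lo + 1 : Nat) : Int) := by push_cast; ring
    have e2 : ((lo : Int) + ((n + 1 : Nat) : Int)) = (((lo + 1 : Nat) : Int) + (n : Int)) := by
      push_cast; ring
    rw [e2, e1, ih (lo + 1) (by omega)]
    rw [List.drop_eq_getElem_cons hlo, List.take_succ_cons, List.count_cons]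
    rw [hget]


lemma segCount_eq (x : Int) (arr : List Int) (lo hi : Nat) (h1 : lo ≤ hi) (h2 : hi ≤ arr.length) :
    segCount x arr lo hi = (((arr.drop lo).take (hi - lo)).count x : Int) := by
  have e : (hi : Int) = (lo : Int) + ((hi - lo : Nat) : Int) := by omega
  rw [segCount, e, PySem.List.foldl_if_add_one, zero_add, cntP x arr (hi - lo) lo (by omega)]

lemma isMaj_base (x : Int) (l : List Int) (h : l.length ≤ 3) :
    is_majority x l = decide ((l.count x : Int) > 1) := by
  rw [is_majority]
  simp only [if_pos h]
  have e : (PySem.List.pyRange 0 l.length 1).foldl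
      (fun c i => if PySem.List.pyGetD l i 0 == x then c + 1 else c) 0
      = segCount x l 0 l.length := by
    simp [segCount]
  rw [e, segCount_eq x l 0 l.length (by omega) (by omega)]
  simp


lemma isMaj_split (x : Int) (l : List Int) (h : ¬ l.length ≤ 3) :
    is_majority x l
      = (is_majority x (l.take (l.length / 2)) && is_majority x (l.drop (l.length / 2))) := by
  rw [is_majority]
  simp only [if_neg h]
  have h2 : PySem.Int.floordiv (l.length : Int) 2 = ((l.length / 2 : Nat) : Int) := by
    exact_mod_cast PySem.Int.floordiv_natCast l.length 2
  rw [h2, PySem.List.slice_to_natCast, PySem.List.slice_from_natCast]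

lemma run_eq (x : Int) (arr : List Int) :
    ∀ (st : List (Nat × Nat)) (acc : Bool),
      (∀ p ∈ st, p.1 ≤ p.2 ∧ p.2 ≤ arr.length) →
      stackRun x arr st acc = (acc && st.all (fun p => segA x arr p)) := by
  intro st acc
  induction st, acc using stackRun.induct x arr with
  | case1 acc => intro _; simp [stackRun]
  | case2 lo hi rest acc n hle ih =>
    intro h
    obtain ⟨hb1, hb2⟩ := h (lo, hi) List.mem_cons_self
    simp only at hb1 hb2
    rw [stackRun, if_pos hle]
    rw [ih (fun p hp => h p (List.mem_cons_of_mem _ hp))]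
    have hseg : segA x arr (lo, hi) = decide (segCount x arr lo hi > 1) := by
      have hlen : ((arr.drop lo).take (hi - lo)).length ≤ 3 := by
        have hn : hi - lo ≤ 3 := hle
        simp; omega
      rw [segA, isMaj_base x _ hlen, segCount_eq x arr lo hi hb1 hb2]
    simp [List.all_cons, hseg, Bool.and_assoc]
  | case3 lo hi rest acc n hle mid ih =>
    intro h
    obtain ⟨hb1, hb2⟩ := h (lo, hi) List.mem_cons_self
    simp only at hb1 hb2
    have hn : ¬ hi - lo ≤ 3 := hle
    have hm : mid = (hi - lo) / 2 := rfl
    rw [stackRun, if_neg hle]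
    rw [ih (by
      intro p hp
      rcases List.mem_cons.mp hp with rfl | hp
      · exact ⟨by simp; omega, by simp; omega⟩
      rcases List.mem_cons.mp hp with rfl | hp
      · exact ⟨by simp, by simp; omega⟩
      exact h p (List.mem_cons_of_mem _ hp))]
    have hlen : ((arr.drop lo).take (hi - lo)).length = hi - lo := by
      simp; omega
    have e1 : ((arr.drop lo).take (hi - lo)).take ((hi - lo) / 2)
        = (arr.drop lo).take (lo + mid - lo) := by
      rw [List.take_take]; congr 1; omega
    have e2 : ((arr.drop lo).take (hi - lo)).drop ((hi - lo) / 2)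
        = (arr.drop (lo + mid)).take (hi - (lo + mid)) := by
      rw [List.drop_take, List.drop_drop]
      congr 1
      omega
    have hsplit : segA x arr (lo, hi)
        = (segA x arr (lo, lo + mid) && segA x arr (lo + mid, hi)) := by
      rw [segA, isMaj_split x _ (by rw [hlen]; omega), hlen, e1, e2]
      simp [segA]
    simp [List.all_cons, hsplit, Bool.and_assoc, Bool.and_comm]



-- ===== VERDICT (by name: the statement is the Claim_ definition above) =====
theorem is_majority_spec : Claim_equal_is_majority := by
  intro x arr _
  unfold Spec_is_majority is_majority_alt
  rw [run_eq x arr _ _ (by intro p hp; simp at hp; simp [hp])]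
  simp [segA]
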